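-- pv_equiv track=rewrite | github.com/0neF0rA11/Algorithms | Yandex_1_0/Hw_3/F.py | calculate_degree_proximity
-- ===== SOURCE A (Python) =====
-- def calculate_degree_proximity(first, second):
--     second_set = {second[ind] + second[ind + 1] for ind in range(len(second) - 1)}
--     result = 0
--
--     for ind in range(len(first) - 1):
--         pair = first[ind] + first[ind + 1]
--         if pair in second_set:
--             result += 1
--
--     return result
-- ===== SOURCE B (Python) =====
-- def calculate_degree_proximity(first, second):
--     counts = {}
--     for pair in map(''.join, zip(first, first[1:])):
--         counts[pair] = counts.get(pair, 0) + 1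
--     second_bigrams = set(map(''.join, zip(second, second[1:])))
--     return sum(c for pair, c in counts.items() if pair in second_bigrams)
-- ===== Notes on version B (the rewrite author's own statement) =====
-- stated objective: alternative
-- what changed: B pairs adjacent characters with zip instead of an index loop, groups first's bigrams into a frequency table, and reduces once over the distinct bigrams (count added per distinct key present in second's bigram set) instead of testing every position separately.
import Mathlib
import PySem

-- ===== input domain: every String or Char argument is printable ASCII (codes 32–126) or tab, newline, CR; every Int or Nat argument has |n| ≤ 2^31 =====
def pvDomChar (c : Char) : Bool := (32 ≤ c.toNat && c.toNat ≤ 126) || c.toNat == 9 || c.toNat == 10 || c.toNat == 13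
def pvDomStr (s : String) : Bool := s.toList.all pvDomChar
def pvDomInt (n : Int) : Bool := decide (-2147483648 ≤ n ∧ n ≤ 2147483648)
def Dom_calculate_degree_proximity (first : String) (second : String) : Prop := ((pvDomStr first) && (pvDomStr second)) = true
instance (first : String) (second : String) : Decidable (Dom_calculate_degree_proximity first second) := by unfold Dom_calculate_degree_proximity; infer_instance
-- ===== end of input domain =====

-- B replaces A's per-position index loop and membership test by zip-built bigram lists,
-- a frequency table over first's bigrams, and one reduction over its distinct keys (alternative decomposition, same cost).
-- Python's two-character strings second[i]+second[i+1] are represented exactly by the Char × Char pair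
-- of those characters (concatenation of two single chars is injective, so set membership is unchanged).

-- ===== PORT A =====
def calculate_degree_proximity (first : String) (second : String) : Int :=
  let s := second.toList
  let second_set : PySem.Set (Char × Char) :=
    (PySem.List.pyRange 0 ((s.length : Int) - 1) 1).foldl
      (fun acc i => PySem.Set.add acc (PySem.List.pyGetD s i ' ', PySem.List.pyGetD s (i + 1) ' '))
      PySem.Set.empty
  let f := first.toList
  (PySem.List.pyRange 0 ((f.length : Int) - 1) 1).foldl
    (fun r i =>
      if PySem.Set.contains second_set (PySem.List.pyGetD f i ' ', PySem.List.pyGetD f (i + 1) ' ')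
      then r + 1 else r) 0

-- ===== PORT B =====
def calculate_degree_proximity_alt (first : String) (second : String) : Int :=
  let f := first.toList
  let counts : PySem.Dict (Char × Char) Int :=
    (f.zip f.tail).foldl (fun d p => d.insert p (d.getD p 0 + 1)) PySem.Dict.empty
  let s := second.toList
  let second_bigrams : PySem.Set (Char × Char) := PySem.Set.ofList (s.zip s.tail)
  counts.items.foldl
    (fun r pc => if PySem.Set.contains second_bigrams pc.1 then r + pc.2 else r) 0

-- ===== PRECONDITION & SPEC =====
def Spec_calculate_degree_proximity (first : String) (second : String) (out : Int) : Prop := out = calculate_degree_proximity_alt first second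
instance (first : String) (second : String) (out : Int) : Decidable (Spec_calculate_degree_proximity first second out) := by unfold Spec_calculate_degree_proximity; infer_instance

-- ===== CLAIM (what is proved, stated in full; the proofs are below) =====
def Claim_equal_calculate_degree_proximity : Prop := ∀ (first : String) (second : String), Dom_calculate_degree_proximity first second → Spec_calculate_degree_proximity first second (calculate_degree_proximity first second)

-- ===== LEMMAS AND PROOFS =====

-- the index loop over range(len(l)-1) produces exactly the adjacent-pair (bigram) list zip l l.tail
lemma bigrams_map (l : List Char) :
    (PySem.List.pyRange 0 ((l.length : Int) - 1) 1).map
      (fun i => (PySem.List.pyGetD l i ' ', PySem.List.pyGetD l (i + 1) ' ')) = l.zip l.tail := by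
  apply List.ext_getElem
  · simp [PySem.List.length_pyRange_one, List.length_tail]
  · intro k h1 h2
    have hk : k < l.length - 1 := by
      simpa [PySem.List.length_pyRange_one] using h1
    have hget : ∀ j : Nat, (hj : j < l.length) → PySem.List.pyGetD l (j : Int) ' ' = l[j]'hj := by
      intro j hj
      rw [PySem.List.pyGetD_natCast]
      simp [List.getD, List.getElem?_eq_getElem hj]
    simp only [List.getElem_map, PySem.List.getElem_pyRange_one, List.getElem_zip]
    have e2 : (k : Int) + 1 = (((k + 1 : Nat)) : Int) := by push_cast; ring
    rw [show (0 : Int) + (k : Int) = ((k : Nat) : Int) by ring, e2,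
        hget k (by omega), hget (k + 1) (by omega)]
    congr 1
    rw [List.getElem_tail]

-- ⟦if p k then f k else 0⟧-sums restrict to the filtered list
lemma sum_map_ite_eq_sum_filter {α : Type} (l : List α) (p : α → Bool) (f : α → Int) :
    (l.map (fun k => if p k then f k else 0)).sum = ((l.filter p).map f).sum := by
  induction l with
  | nil => simp
  | cons x t ih =>
    by_cases hx : p x = true <;> simp [hx, ih]

-- 'if p k: r += g k' accumulation as a sum
lemma foldl_if_add {α : Type} (l : List α) (p : α → Bool) (g : α → Int) (a : Int) :
    l.foldl (fun r k => if p k then r + g k else r) a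
      = a + (l.map (fun k => if p k then g k else 0)).sum := by
  induction l generalizing a with
  | nil => simp
  | cons x t ih =>
    by_cases hx : p x = true
    · simp [hx, ih]; ring
    · simp [hx, ih]

-- any lawful BEq counts like the DecidableEq-derived one (bridges instBEqProd vs instBEqOfDecidableEq)
lemma count_lawful_eq {α : Type} [inst : BEq α] [LawfulBEq α] [DecidableEq α] (a : α) (l : List α) :
    @List.count α inst a l = @List.count α instBEqOfDecidableEq a l := by
  simp only [List.count]
  apply List.countP_congr
  intro x _
  simp

-- countP over a list equals the count-weighted sum over its distinct elements
lemma countP_eq_sum_over_set {α : Type} [BEq α] [LawfulBEq α] [DecidableEq α] (F : List α) (p : α → Bool) :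
    ((PySem.Set.ofList F).map (fun k => if p k then (F.count k : Int) else 0)).sum
      = (F.countP p : Int) := by
  have hperm : (PySem.Set.ofList F).Perm F.dedup := by
    refine (List.perm_ext_iff_of_nodup (PySem.Set.nodup_ofList F) F.nodup_dedup).2 ?_
    intro x
    simp [PySem.Set.mem_ofList, List.mem_dedup]
  rw [(hperm.map _).sum_eq, sum_map_ite_eq_sum_filter]
  simp only [count_lawful_eq]
  calc ((F.dedup.filter p).map (fun k => (@List.count α instBEqOfDecidableEq k F : Int))).sum
      = (((F.dedup.filter p).map (fun k => @List.count α instBEqOfDecidableEq k F)).map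
          (fun n : Nat => (n : Int))).sum := by
        rw [List.map_map]; rfl
    _ = ((((F.dedup.filter p).map (fun k => @List.count α instBEqOfDecidableEq k F)).sum : Nat) : Int) := by
        rw [Nat.cast_list_sum]
    _ = (F.countP p : Int) := by
        rw [← List.sum_map_count_dedup_filter_eq_countP p F]

-- ===== VERDICT (by name: the statement is the Claim_ definition above) =====
theorem calculate_degree_proximity_spec : Claim_equal_calculate_degree_proximity := by
  intro first second _
  unfold Spec_calculate_degree_proximity
  simp only [calculate_degree_proximity, calculate_degree_proximity_alt]
  set f := first.toList with hf
  set s := second.toList with hs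
  set F := f.zip f.tail with hF
  set S : PySem.Set (Char × Char) := PySem.Set.ofList (s.zip s.tail) with hS
  -- A's set-building loop builds exactly S
  have hset :
      (PySem.List.pyRange 0 ((s.length : Int) - 1) 1).foldl
        (fun acc i => PySem.Set.add acc (PySem.List.pyGetD s i ' ', PySem.List.pyGetD s (i + 1) ' '))
        PySem.Set.empty = S := by
    rw [← PySem.Set.update_map_eq_foldl_add, bigrams_map, hS]
    exact PySem.Set.update_empty _
  rw [hset]
  -- A's counting loop is countP over F
  have hA :
      (PySem.List.pyRange 0 ((f.length : Int) - 1) 1).foldl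
        (fun r i =>
          if PySem.Set.contains S (PySem.List.pyGetD f i ' ', PySem.List.pyGetD f (i + 1) ' ')
          then r + 1 else r) 0
        = (F.countP (fun x => PySem.Set.contains S x) : Int) := by
    rw [PySem.List.foldl_if_add_one]
    have hcm := List.countP_map (p := fun x => PySem.Set.contains S x)
      (f := fun i : Int => (PySem.List.pyGetD f i ' ', PySem.List.pyGetD f (i + 1) ' '))
      (l := PySem.List.pyRange 0 ((f.length : Int) - 1) 1)
    rw [bigrams_map] at hcm
    simp only [Function.comp_def] at hcm
    rw [← hcm]
    simp [hF]
  rw [hA]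
  -- B's dict loop is the counter of F; its items are the distinct bigrams with their counts
  rw [PySem.Dict.foldl_insert_getD_add_one_eq_counter, PySem.Dict.items_counter]
  rw [List.foldl_map]
  dsimp only
  rw [foldl_if_add, zero_add]
  exact (countP_eq_sum_over_set F (fun x => PySem.Set.contains S x)).symm
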